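-- pv_equiv track=rewrite | github.com/Crypto-TII/shanatomy | bitpy.py | words_from_string
-- ===== SOURCE A (Python) =====
-- def words_from_string(wl, string):
--     '''
--     Parameters
--     ----------
--     wl : int
--         bit length of the word
--     string : str
--         the string from which getting the block
--     Returns
--     -------
--     list
--         list of 16 integers representing the block for hash algorithm
--     Examples:
--         >>> W=words_from_string(32, '')
--         >>> [f'{w:08x}' for w in W]
--         ['80000000', '00000000', '00000000', '00000000', '00000000',
--         '00000000', '00000000', '00000000', '00000000', '00000000',
--         '00000000', '00000000', '00000000', '00000000', '00000000',
--         '00000000']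
--         >>> W=words_from_string(32, 'Chiara')
--         >>> [f'{w:08x}' for w in W]
--         ['43686961', '72618000', '00000000', '00000000', '00000000',
--         '00000000', '00000000', '00000000', '00000000', '00000000',
--         '00000000', '00000000', '00000000', '00000000', '00000000',
--         '00000030']
--     '''
--     if string == '':
--         return [2 ** (wl - 1)] + [0] * 15
--     n = 1 + len(string) // 64
--     block = ord(string[0])
--     for i in range(1, len(string)):
--         block = block << 8 ^ ord(string[i])
--     block = block << 1 ^ 1
--     pad_length = 16 * wl * n - 8 * len(string) - 1
--     block <<= pad_length
--     block ^= len(string * 8)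
--     block_words = [0] * (16 * n)
--     mask = 2 ** wl - 1
--     for i in range(16 * n):
--         block_words[i] = block >> (i * wl) & mask
--     return block_words[::-1]
-- ===== SOURCE B (Python) =====
-- def words_from_string(wl, string):
--     if string == '':
--         return [1 << (wl - 1)] + [0] * 15
--     L = len(string)
--     total = 16 * wl * (1 + L // 64)
--     pad = total - 8 * L - 1
--     block = int.from_bytes(string.encode(), 'big')
--     block = (block << (pad + 1) | 1 << pad) ^ 8 * L
--     bits = format(block, 'b').zfill(total)
--     return [int(bits[j:j + wl], 2) for j in range(0, total, wl)]
-- ===== Notes on version B (the rewrite author's own statement) =====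
-- stated objective: faster
-- what changed: B builds the padded message integer with int.from_bytes and a single or/shift instead of A's per-character shift-xor loop, and extracts all words at once by formatting the integer as a zero-filled binary string and slicing it into wl-bit chunks, instead of A's per-word shift of the full-size integer followed by a reversal.
-- outside the precondition, e.g. on words_from_string(0, ''): A returns [0.5, 0, 0, 0, 0, 0, 0, 0, 0, 0, 0, 0, 0, 0, 0, 0], B raises ValueError
import Mathlib
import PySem

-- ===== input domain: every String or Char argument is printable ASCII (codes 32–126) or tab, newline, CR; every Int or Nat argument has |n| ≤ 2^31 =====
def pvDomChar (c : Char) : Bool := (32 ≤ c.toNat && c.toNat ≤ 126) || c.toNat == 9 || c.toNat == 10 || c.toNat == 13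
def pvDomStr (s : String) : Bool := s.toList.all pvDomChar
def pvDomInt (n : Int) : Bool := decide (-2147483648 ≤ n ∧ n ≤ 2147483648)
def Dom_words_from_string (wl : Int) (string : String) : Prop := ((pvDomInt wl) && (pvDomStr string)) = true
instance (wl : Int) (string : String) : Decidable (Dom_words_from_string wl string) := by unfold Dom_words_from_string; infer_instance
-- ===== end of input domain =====

-- B packs the message with int.from_bytes + one shift/or and splits it by slicing its zero-filled
-- binary digit string into wl-bit chunks, replacing A's per-character shift-xor loop and per-word
-- full-width shifts (measured faster at large sizes).


-- ===== PORT A =====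
def words_from_string (wl : Int) (string : String) : List Int :=
  if string = "" then
    ((2:Int) ^ (wl - 1).toNat) :: List.replicate 15 0  -- 2**(wl-1); Pre_ gives 1 ≤ wl (Python yields a float otherwise)
  else
    let s := string.toList
    let n : Int := 1 + PySem.Int.floordiv (s.length : Int) 64
    let block0 : Int := ((PySem.List.pyGetD s 0 ' ').toNat : Int)          -- ord(string[0])
    let block1 : Int :=
      (PySem.List.pyRange 1 (s.length : Int) 1).foldl
        (fun b i => PySem.Int.bxor (b <<< (8:Nat)) ((PySem.List.pyGetD s i ' ').toNat : Int)) block0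
    let block2 : Int := PySem.Int.bxor (block1 <<< (1:Nat)) 1
    let pad : Int := 16 * wl * n - 8 * (s.length : Int) - 1
    let block3 : Int := block2 <<< pad.toNat          -- Python raises on a negative shift; Pre_ gives 0 ≤ pad
    let block4 : Int := PySem.Int.bxor block3 (8 * (s.length : Int))      -- len(string*8) = 8*len(string)
    let mask : Int := 2 ^ wl.toNat - 1                -- 2**wl - 1; Pre_ gives 1 ≤ wl
    let words := (PySem.List.pyRange 0 (16 * n) 1).map
        (fun i => PySem.Int.band (block4 >>> (i * wl).toNat) mask)
    (PySem.List.slice? words none none (-1)).getD []  -- block_words[::-1]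

-- ===== PORT B =====
-- int.from_bytes(string.encode(), 'big'); exact for the one-byte characters Dom admits
def pvFromBytes (cs : List Char) : Nat := cs.foldl (fun a c => a * 256 + c.toNat) 0

-- binary digits of x, most significant first; format(x, 'b') (empty for 0: see note at use site)
def pvBinDigitsAux (x : Nat) (acc : List Nat) : List Nat :=
  if _h : x = 0 then acc else pvBinDigitsAux (x / 2) (x % 2 :: acc)
decreasing_by exact Nat.div_lt_self (Nat.pos_of_ne_zero _h) one_lt_two

def pvBinDigits (x : Nat) : List Nat := pvBinDigitsAux x []

-- int(chunk, 2)
def pvBitsVal (bs : List Nat) : Nat := bs.foldl (fun a b => 2 * a + b) 0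

def words_from_string_alt (wl : Int) (string : String) : List Int :=
  if string = "" then
    ((1:Int) <<< (wl - 1).toNat) :: List.replicate 15 0
  else
    let L := string.toList.length
    let total : Int := 16 * wl * (1 + PySem.Int.floordiv (L : Int) 64)
    let pad : Int := total - 8 * (L : Int) - 1
    let b0 : Nat := pvFromBytes string.toList
    let block : Nat := (b0 <<< (pad.toNat + 1) ||| 1 <<< pad.toNat) ^^^ (8 * L)
    -- format(block, 'b').zfill(total): left-pad the digits with zeros to length total
    -- (format(0,'b') = "0" zero-fills to the same all-zero digit list)
    let digits := pvBinDigits block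
    let bits := List.replicate (total.toNat - digits.length) 0 ++ digits
    (PySem.List.pyRange 0 total wl).map
      (fun j => (pvBitsVal (PySem.List.slice bits (some j) (some (j + wl))) : Int))

-- ===== PRECONDITION & SPEC =====
-- Pre_ = exactly the inputs where the Python A returns a list of ints: wl ≥ 1 (for wl ≤ 0 A returns a
-- float in the empty-string case and raises ValueError otherwise) and a nonnegative pad length
-- (otherwise A raises ValueError: negative shift count).
def Pre_words_from_string (wl : Int) (string : String) : Prop :=
  1 ≤ wl ∧ (string = "" ∨
    0 ≤ 16 * wl * (1 + PySem.Int.floordiv (string.toList.length : Int) 64) - 8 * (string.toList.length : Int) - 1)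
instance (wl : Int) (string : String) : Decidable (Pre_words_from_string wl string) := by
  unfold Pre_words_from_string; infer_instance

def pvWitness_words_from_string : Int × String := (32, "abc")

def Spec_words_from_string (wl : Int) (string : String) (out : List Int) : Prop :=
  out = words_from_string_alt wl string
instance (wl : Int) (string : String) (out : List Int) : Decidable (Spec_words_from_string wl string out) := by
  unfold Spec_words_from_string; infer_instance

-- ===== CLAIM (what is proved, stated in full; the proofs are below) =====
def Claim_equal_words_from_string : Prop := ∀ (wl : Int) (string : String), Dom_words_from_string wl string → Pre_words_from_string wl string → Spec_words_from_string wl string (words_from_string wl string)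

-- ===== LEMMAS AND PROOFS =====

-- bit arithmetic: xor / or with a small addend is addition
theorem pvXorAdd (a c k : Nat) (hc : c < 2 ^ k) : a <<< k ^^^ c = a <<< k + c := by
  apply Nat.eq_of_testBit_eq
  intro i
  rw [Nat.shiftLeft_eq, ← Nat.mul_comm (2 ^ k), Nat.testBit_two_pow_mul_add a hc,
    Nat.mul_comm (2 ^ k), ← Nat.shiftLeft_eq, Nat.testBit_xor, Nat.testBit_shiftLeft]
  by_cases hik : i < k
  · simp [hik, Nat.not_le.mpr hik]
  · have : c.testBit i = false := Nat.testBit_lt_two_pow (lt_of_lt_of_le hc (Nat.pow_le_pow_right (by norm_num) (Nat.le_of_not_lt hik)))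
    simp [this, Nat.le_of_not_lt hik]

theorem pvOrAdd (a c k : Nat) (hc : c < 2 ^ k) : a <<< k ||| c = a <<< k + c := by
  apply Nat.eq_of_testBit_eq
  intro i
  rw [Nat.shiftLeft_eq, ← Nat.mul_comm (2 ^ k), Nat.testBit_two_pow_mul_add a hc,
    Nat.mul_comm (2 ^ k), ← Nat.shiftLeft_eq, Nat.testBit_or, Nat.testBit_shiftLeft]
  by_cases hik : i < k
  · simp [hik, Nat.not_le.mpr hik]
  · have : c.testBit i = false := Nat.testBit_lt_two_pow (lt_of_lt_of_le hc (Nat.pow_le_pow_right (by norm_num) (Nat.le_of_not_lt hik)))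
    simp [this, Nat.le_of_not_lt hik]

-- pvBitsVal basics
theorem pvBitsVal_foldl (l : List Nat) (a : Nat) :
    l.foldl (fun a b => 2 * a + b) a = a * 2 ^ l.length + pvBitsVal l := by
  induction l generalizing a with
  | nil => simp [pvBitsVal]
  | cons x xs ih =>
      simp only [List.foldl_cons, List.length_cons, pvBitsVal]
      rw [ih (2 * a + x), ih (2 * 0 + x)]
      ring

theorem pvBitsVal_cons (x : Nat) (xs : List Nat) :
    pvBitsVal (x :: xs) = x * 2 ^ xs.length + pvBitsVal xs := by
  simp only [pvBitsVal, List.foldl_cons]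
  rw [show 2 * 0 + x = x from by ring, pvBitsVal_foldl]
  rfl

theorem pvBitsVal_append (x y : List Nat) :
    pvBitsVal (x ++ y) = pvBitsVal x * 2 ^ y.length + pvBitsVal y := by
  simp only [pvBitsVal, List.foldl_append]
  rw [pvBitsVal_foldl]
  rfl

theorem pvBitsVal_lt (l : List Nat) (h : ∀ b ∈ l, b < 2) : pvBitsVal l < 2 ^ l.length := by
  induction l with
  | nil => simp [pvBitsVal]
  | cons x xs ih =>
      rw [pvBitsVal_cons]
      have hx : x < 2 := h x (by simp)
      have := ih (fun b hb => h b (by simp [hb]))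
      have : pvBitsVal xs < 2 ^ xs.length := this
      have hx1 : x ≤ 1 := by omega
      calc x * 2 ^ xs.length + pvBitsVal xs ≤ 1 * 2 ^ xs.length + pvBitsVal xs := by
            exact Nat.add_le_add_right (Nat.mul_le_mul_right _ hx1) _
        _ < 2 ^ (x :: xs).length := by simp [List.length_cons, Nat.pow_succ]; omega

theorem pvBitsVal_replicate_append (m : Nat) (l : List Nat) :
    pvBitsVal (List.replicate m 0 ++ l) = pvBitsVal l := by
  rw [pvBitsVal_append]
  have : pvBitsVal (List.replicate m 0) = 0 := by
    induction m with
    | zero => simp [pvBitsVal]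
    | succ k ih => rw [List.replicate_succ, pvBitsVal_cons, ih]; simp
  simp [this]

-- pvBinDigits basics
theorem pvBinDigitsAux_eq (x : Nat) (acc : List Nat) :
    pvBinDigitsAux x acc = pvBinDigitsAux x [] ++ acc := by
  induction x using Nat.strong_induction_on generalizing acc with
  | _ x ih =>
      by_cases h : x = 0
      · subst h
        simp [pvBinDigitsAux]
      · conv_lhs => rw [pvBinDigitsAux]
        conv_rhs => rw [pvBinDigitsAux]
        simp only [h, dif_neg, not_false_iff]
        have hlt := Nat.div_lt_self (Nat.pos_of_ne_zero h) one_lt_two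
        rw [ih (x / 2) hlt (x % 2 :: acc), ih (x / 2) hlt [x % 2]]
        simp

theorem pvBinDigits_eq (x : Nat) :
    pvBinDigits x = if x = 0 then [] else pvBinDigits (x / 2) ++ [x % 2] := by
  unfold pvBinDigits
  rw [pvBinDigitsAux]
  by_cases h : x = 0
  · simp [h]
  · simp only [h, dif_neg, not_false_iff, if_neg]
    exact pvBinDigitsAux_eq (x / 2) [x % 2]

theorem pvBinDigits_val (x : Nat) : pvBitsVal (pvBinDigits x) = x := by
  induction x using Nat.strong_induction_on with
  | _ x ih =>
      rw [pvBinDigits_eq]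
      by_cases h : x = 0
      · simp [h, pvBitsVal]
      · simp only [h, if_neg, not_false_iff]
        rw [pvBitsVal_append, ih (x / 2) (Nat.div_lt_self (Nat.pos_of_ne_zero h) one_lt_two)]
        simp [pvBitsVal]
        omega

theorem pvBinDigits_lt_two (x : Nat) : ∀ b ∈ pvBinDigits x, b < 2 := by
  induction x using Nat.strong_induction_on with
  | _ x ih =>
      rw [pvBinDigits_eq]
      by_cases h : x = 0
      · simp [h]
      · simp only [h, if_neg, not_false_iff]
        intro b hb
        rcases List.mem_append.mp hb with hb | hb
        · exact ih (x / 2) (Nat.div_lt_self (Nat.pos_of_ne_zero h) one_lt_two) b hb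
        · simp at hb; omega

theorem pvBinDigits_length_le (k : Nat) : ∀ x : Nat, x < 2 ^ k → (pvBinDigits x).length ≤ k := by
  induction k with
  | zero =>
      intro x hx
      have : x = 0 := by simpa using hx
      rw [this, pvBinDigits_eq]; simp
  | succ k ih =>
      intro x hx
      rw [pvBinDigits_eq]
      by_cases h : x = 0
      · simp [h]
      · simp only [h, if_neg, not_false_iff, List.length_append, List.length_cons]
        have := ih (x / 2) (by omega)
        simp only [List.length_nil]
        omega

-- pvFromBytes bound
theorem pvFromBytes_foldl_lt (cs : List Char) (a : Nat) (h : ∀ c ∈ cs, c.toNat < 256) :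
    cs.foldl (fun a c => a * 256 + c.toNat) a < (a + 1) * 2 ^ (8 * cs.length) := by
  induction cs generalizing a with
  | nil => simp
  | cons c rest ih =>
      simp only [List.foldl_cons, List.length_cons]
      have hc : c.toNat < 256 := h c (by simp)
      have := ih (a * 256 + c.toNat) (fun c hc => h c (by simp [hc]))
      calc List.foldl (fun a c => a * 256 + c.toNat) (a * 256 + c.toNat) rest
          < (a * 256 + c.toNat + 1) * 2 ^ (8 * rest.length) := this
        _ ≤ ((a + 1) * 256) * 2 ^ (8 * rest.length) := by
            apply Nat.mul_le_mul_right; omega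
        _ = (a + 1) * 2 ^ (8 * (rest.length + 1)) := by ring
  
theorem pvFromBytes_lt (cs : List Char) (h : ∀ c ∈ cs, c.toNat < 256) :
    pvFromBytes cs < 2 ^ (8 * cs.length) := by
  have := pvFromBytes_foldl_lt cs 0 h
  simpa [pvFromBytes] using this

-- A's character fold equals pvFromBytes (cast to Int)
theorem pvFoldEq (rest : List Char) (a : Nat) (h : ∀ c ∈ rest, c.toNat < 256) :
    rest.foldl (fun b c => PySem.Int.bxor (b <<< (8:Nat)) ((c.toNat : Nat) : Int)) ((a : Nat) : Int)
      = ((rest.foldl (fun x c => x * 256 + c.toNat) a : Nat) : Int) := by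
  induction rest generalizing a with
  | nil => simp
  | cons c rest ih =>
      simp only [List.foldl_cons]
      have hcast : ((a : Nat) : Int) <<< (8:Nat) = ((a <<< 8 : Nat) : Int) := by exact_mod_cast rfl
      rw [hcast, PySem.Int.bxor_natCast,
        pvXorAdd a c.toNat 8 (by have := h c (by simp); omega : c.toNat < 2 ^ 8)]
      rw [ih (a <<< 8 + c.toNat) (fun c hc => h c (by simp [hc]))]
      norm_num [Nat.shiftLeft_eq]

-- the Nat-level packed block: A's construction equals B's
theorem pvBlockEq (b0 pad : Nat) :
    (b0 <<< (1:Nat) ^^^ 1) <<< pad = b0 <<< (pad + 1) ||| 1 <<< pad := by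
  rw [pvXorAdd b0 1 1 (by norm_num), pvOrAdd b0 (1 <<< pad) (pad + 1)
    (by rw [Nat.shiftLeft_eq, Nat.one_mul]; exact Nat.pow_lt_pow_right (by norm_num) (by omega))]
  simp [Nat.shiftLeft_eq]
  ring

-- the chunk lemma: the value of the k-th wl-bit slice of the digit list
theorem pvChunkVal (bs : List Nat) (W wl k : Nat) (hb : ∀ b ∈ bs, b < 2)
    (hlen : bs.length = W * wl) (hk : k < W) :
    pvBitsVal ((bs.drop (k * wl)).take wl) = pvBitsVal bs >>> ((W - 1 - k) * wl) % 2 ^ wl := by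
  have hkw : k * wl + wl ≤ W * wl := by
    have h1 : (k + 1) * wl ≤ W * wl := Nat.mul_le_mul_right wl (by omega)
    have h2 : (k + 1) * wl = k * wl + wl := by ring
    omega
  set pre := bs.take (k * wl) with hpre
  set mid := (bs.drop (k * wl)).take wl with hmid
  set post := bs.drop (k * wl + wl) with hpost
  have hdecomp : bs = pre ++ mid ++ post := by
    rw [hpre, hmid, hpost, List.append_assoc, ← List.drop_drop]
    rw [List.take_append_drop, List.take_append_drop]
  have hlpre : pre.length = k * wl := by
    rw [hpre, List.length_take]; omega
  have hlmid : mid.length = wl := by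
    rw [hmid, List.length_take, List.length_drop]; omega
  have hlpost : post.length = (W - 1 - k) * wl := by
    rw [hpost, List.length_drop, hlen, Nat.sub_mul, Nat.sub_mul, Nat.one_mul]
    omega
  have hmidlt : pvBitsVal mid < 2 ^ wl := by
    have := pvBitsVal_lt mid (fun b hb' => hb b (by rw [hdecomp]; simp [hmid]; tauto))
    rwa [hlmid] at this
  have hpostlt : pvBitsVal post < 2 ^ ((W - 1 - k) * wl) := by
    have := pvBitsVal_lt post (fun b hb' => hb b (by rw [hdecomp]; simp; tauto))
    rwa [hlpost] at this
  rw [hdecomp, pvBitsVal_append, pvBitsVal_append, hlpost, hlmid]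
  rw [Nat.shiftRight_eq_div_pow]
  set m := (W - 1 - k) * wl
  set P := pvBitsVal pre
  set M := pvBitsVal mid
  set Q := pvBitsVal post
  have hm : 0 < 2 ^ m := Nat.two_pow_pos m
  have hdiv : ((P * 2 ^ wl + M) * 2 ^ m + Q) / 2 ^ m = P * 2 ^ wl + M := by
    rw [Nat.add_comm, Nat.add_mul_div_right _ _ hm, Nat.div_eq_of_lt hpostlt]
    omega
  rw [hdiv, Nat.mul_comm P, Nat.mul_add_mod, Nat.mod_eq_of_lt hmidlt]

-- reverse of a map over range
theorem pvRevMapRange {α : Type} (W : Nat) (f : Nat → α) :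
    ((List.range W).map f).reverse = (List.range W).map (fun k => f (W - 1 - k)) := by
  apply List.ext_getElem
  · simp
  · intro i h1 h2
    simp only [List.getElem_reverse, List.length_map, List.length_range] at *
    simp only [List.getElem_map, List.getElem_range]

-- cast helpers
theorem pvCastShiftL (a : Nat) (k : Nat) : ((a : Nat) : Int) <<< k = ((a <<< k : Nat) : Int) := by
  exact_mod_cast rfl

theorem pvCastShiftR (a : Nat) (k : Nat) : ((a : Nat) : Int) >>> k = ((a >>> k : Nat) : Int) := by
  exact_mod_cast rfl

theorem pvFloordiv64 (L : Nat) : PySem.Int.floordiv (L : Int) 64 = ((L / 64 : Nat) : Int) := by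
  simp [PySem.Int.floordiv, Int.fdiv_eq_ediv_of_nonneg]

-- main equivalence
theorem pvMain (wl : Int) (string : String) (hdom : Dom_words_from_string wl string)
    (hpre : Pre_words_from_string wl string) :
    words_from_string wl string = words_from_string_alt wl string := by
  obtain ⟨hwl, hrest⟩ := hpre
  by_cases hs : string = ""
  · subst hs
    simp only [words_from_string, words_from_string_alt]
    have h1 : (1 : Int) <<< (wl - 1).toNat = ((1 <<< (wl - 1).toNat : Nat) : Int) :=
      pvCastShiftL 1 _
    rw [h1]
    norm_num [Nat.shiftLeft_eq]
  · -- notation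
    have hcsne : string.toList ≠ [] := fun h => hs (String.toList_eq_nil_iff.mp h)
    obtain ⟨c0, rest, hcs0⟩ : ∃ c r, string.toList = c :: r := by
      cases h : string.toList with
      | nil => exact absurd h hcsne
      | cons c r => exact ⟨c, r, rfl⟩
    have hchars : ∀ c ∈ string.toList, c.toNat < 256 := by
      intro c hc
      have := hdom
      unfold Dom_words_from_string at this
      simp only [Bool.and_eq_true, pvDomStr, List.all_eq_true] at this
      have := this.2 c hc
      simp only [pvDomChar, Bool.or_eq_true, Bool.and_eq_true, decide_eq_true_eq, beq_iff_eq] at this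
      omega
    set L := string.toList.length with hLdef
    have hL1 : 1 ≤ L := by rw [hLdef, hcs0]; simp
    set wlN := wl.toNat with hwlNdef
    have hwlcast : (wlN : Int) = wl := Int.toNat_of_nonneg (by omega)
    have hwlN1 : 1 ≤ wlN := by omega
    set W := 16 * (1 + L / 64) with hWdef
    set totalN := W * wlN with htotdef
    have htotcast : 16 * wl * (1 + PySem.Int.floordiv (L : Int) 64) = (totalN : Int) := by
      rw [pvFloordiv64, htotdef, hWdef, ← hwlcast]
      push_cast
      ring
    have hpadI : 0 ≤ 16 * wl * (1 + PySem.Int.floordiv ((L : Nat) : Int) 64) - 8 * (L : Int) - 1 := by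
      rcases hrest with h | h
      · exact absurd h hs
      · exact h
    rw [htotcast] at hpadI
    have htotL : 8 * L + 1 ≤ totalN := by exact_mod_cast by omega
    set padN := totalN - 8 * L - 1 with hpadNdef
    have hpadcast : ((totalN : Int) - 8 * (L : Int) - 1).toNat = padN := by
      rw [hpadNdef]; omega
    -- the common packed block
    set fb := pvFromBytes string.toList with hfbdef
    set nb := (fb <<< (padN + 1) ||| 1 <<< padN) ^^^ (8 * L) with hnbdef
    have hfblt : fb < 2 ^ (8 * L) := by
      rw [hfbdef, hLdef]
      exact pvFromBytes_lt _ hchars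
    have hnblt : nb < 2 ^ totalN := by
      apply Nat.xor_lt_two_pow
      · apply Nat.or_lt_two_pow
        · rw [Nat.shiftLeft_eq]
          calc fb * 2 ^ (padN + 1) < 2 ^ (8 * L) * 2 ^ (padN + 1) := by
                exact (Nat.mul_lt_mul_right (Nat.two_pow_pos _)).mpr hfblt
            _ = 2 ^ (8 * L + (padN + 1)) := by rw [← Nat.pow_add]
            _ ≤ 2 ^ totalN := Nat.pow_le_pow_right (by norm_num) (by omega)
        · rw [Nat.shiftLeft_eq, Nat.one_mul]
          exact Nat.pow_lt_pow_right (by norm_num) (by omega)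
      · calc 8 * L < totalN := by omega
          _ < 2 ^ totalN := Nat.lt_two_pow_self
    -- A's side reduces to a map over range W
    have hmask : (2 : Int) ^ wl.toNat - 1 = ((2 ^ wlN - 1 : Nat) : Int) := by
      rw [Int.natCast_sub Nat.one_le_two_pow]
      push_cast
      rfl
    have hA : words_from_string wl string =
        ((List.range W).map
          (fun i => ((nb >>> (i * wlN) &&& (2 ^ wlN - 1) : Nat) : Int))).reverse := by
      simp only [words_from_string, if_neg hs]
      rw [PySem.List.slice?_none_none_neg_one, Option.getD_some]
      rw [← hLdef]
      -- the packed block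
      have h0 : PySem.List.pyGetD string.toList 0 ' ' = c0 := by
        rw [hcs0, show (0 : Int) = ((0 : Nat) : Int) from rfl, PySem.List.pyGetD_natCast]
        rfl
      have hfold : (PySem.List.pyRange 1 (L : Int) 1).foldl
          (fun b i => PySem.Int.bxor (b <<< (8 : Nat))
            (((PySem.List.pyGetD string.toList i ' ').toNat : Nat) : Int))
          (((PySem.List.pyGetD string.toList 0 ' ').toNat : Nat) : Int) = ((fb : Nat) : Int) := by
        rw [h0, hLdef]
        rw [PySem.List.foldl_pyRange_pyGetD' string.toList ' '
          (fun (b : Int) (c : Char) => PySem.Int.bxor (b <<< (8 : Nat)) ((c.toNat : Nat) : Int))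
          ((c0.toNat : Nat) : Int) (by norm_num)]
        rw [hcs0]
        simp only [Int.toNat_one, List.drop_succ_cons, List.drop_zero]
        rw [pvFoldEq rest c0.toNat (fun c hc => hchars c (by rw [hcs0]; simp [hc]))]
        congr 1
        rw [hfbdef, pvFromBytes, hcs0, List.foldl_cons]
        norm_num
      rw [hfold]
      have hb2 : PySem.Int.bxor (((fb : Nat) : Int) <<< (1 : Nat)) 1
          = (((fb <<< 1 ^^^ 1 : Nat)) : Int) := by
        rw [pvCastShiftL, show (1 : Int) = ((1 : Nat) : Int) from rfl, PySem.Int.bxor_natCast]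
      rw [hb2, htotcast, hpadcast, pvCastShiftL]
      have hb4 : PySem.Int.bxor ((((fb <<< 1 ^^^ 1) <<< padN : Nat)) : Int) (8 * (L : Int))
          = ((nb : Nat) : Int) := by
        rw [show (8 : Int) * (L : Int) = ((8 * L : Nat) : Int) by push_cast; ring,
          PySem.Int.bxor_natCast, hnbdef, pvBlockEq]
      rw [hb4]
      -- the extraction map
      have hrange : (16 : Int) * (1 + PySem.Int.floordiv (L : Int) 64) = ((W : Nat) : Int) := by
        rw [pvFloordiv64, hWdef]
        push_cast
        ring
      rw [hrange, PySem.List.pyRange_zero_nat, List.map_map]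
      congr 1
      apply List.map_congr_left
      intro k hk
      simp only [Function.comp_apply]
      have hik : (((k : Nat) : Int) * wl).toNat = k * wlN := by
        rw [← hwlcast, ← Int.natCast_mul, Int.toNat_natCast]
      rw [hik, hmask, pvCastShiftR, PySem.Int.band_natCast]
    -- B's side
    have hB : words_from_string_alt wl string =
        (List.range W).map
          (fun k => ((nb >>> ((W - 1 - k) * wlN) &&& (2 ^ wlN - 1) : Nat) : Int)) := by
      simp only [words_from_string_alt, if_neg hs]
      rw [← hLdef, htotcast, hpadcast, Int.toNat_natCast, ← hfbdef, ← hnbdef]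
      set bits := List.replicate (totalN - (pvBinDigits nb).length) 0 ++ pvBinDigits nb
        with hbitsdef
      have hdlen : (pvBinDigits nb).length ≤ totalN := pvBinDigits_length_le totalN nb hnblt
      have hbitslen : bits.length = W * wlN := by
        rw [hbitsdef]
        simp only [List.length_append, List.length_replicate]
        omega
      have hbitsval : pvBitsVal bits = nb := by
        rw [hbitsdef, pvBitsVal_replicate_append, pvBinDigits_val]
      have hbitslt : ∀ b ∈ bits, b < 2 := by
        intro b hb
        rw [hbitsdef] at hb
        rcases List.mem_append.mp hb with hb | hb
        · have := List.eq_of_mem_replicate hb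
          omega
        · exact pvBinDigits_lt_two nb b hb
      -- the stepped range has exactly W indices
      rw [PySem.List.pyRange_of_pos 0 (totalN : Int) (show (0 : Int) < wl by omega)]
      have hcnt : (if (0 : Int) < (totalN : Nat) then
          ((((totalN : Nat) : Int) - 0 + wl - 1) / wl).toNat else 0) = W := by
        rw [if_pos (by exact_mod_cast by omega : (0 : Int) < ((totalN : Nat) : Int))]
        rw [← hwlcast]
        have h1 : ((totalN : Nat) : Int) - 0 + ((wlN : Nat) : Int) - 1
            = (((totalN + wlN - 1 : Nat)) : Int) := by
          rw [Int.natCast_sub (by omega)]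
          push_cast
          ring
        rw [h1, ← Int.natCast_div, Int.toNat_natCast]
        have hcm : totalN + wlN - 1 = wlN * W + (wlN - 1) := by
          have h2 : W * wlN = wlN * W := Nat.mul_comm W wlN
          omega
        rw [hcm, Nat.mul_add_div (by omega), Nat.div_eq_of_lt (by omega)]
        omega
      rw [hcnt, List.map_map]
      apply List.map_congr_left
      intro k hk
      have hkW : k < W := List.mem_range.mp hk
      simp only [Function.comp_apply]
      have hj : (0 : Int) + wl * ((k : Nat) : Int) = ((k * wlN : Nat) : Int) := by
        rw [← hwlcast]
        push_cast
        ring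
      rw [hj, ← hwlcast, PySem.List.slice_natCast_add]
      rw [pvChunkVal bits W wlN k hbitslt hbitslen hkW, hbitsval,
        Nat.and_two_pow_sub_one_eq_mod]
    rw [hA, hB, pvRevMapRange]

-- ===== VERDICT (by name: the statement is the Claim_ definition above) =====
theorem words_from_string_spec : Claim_equal_words_from_string := by
  intro wl string hdom hpre
  unfold Spec_words_from_string
  exact pvMain wl string hdom hpre
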